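-- pv_equiv track=rewrite | github.com/DOSAYGO-Research/irradix | ta5.py | calculate_theoretical_length
-- ===== SOURCE A (Python) =====
-- def calculate_theoretical_length(numbers):
--     length = 0
--     for number in numbers:
--         bit_length = number.bit_length()
--         if bit_length <= 6:
--             length += 2 + 6 + bit_length
--         elif bit_length <= 14:
--             length += 2 + 14 + bit_length
--         elif bit_length <= 22:
--             length += 2 + 22 + bit_length
--         else:
--             length += 2 + 30 + bit_length
--     return length
-- ===== SOURCE B (Python) =====
-- def calculate_theoretical_length(numbers):
--     # Staged passes: total bit length + fixed 32 per element, minus 8 for each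
--     # value-range threshold a number falls under (|n|<2^6, <2^14, <2^22),
--     # which yields headers 6/14/22/30 without per-element bucket selection.
--     bits = sum(n.bit_length() for n in numbers)
--     c6 = sum(1 for n in numbers if -64 < n < 64)
--     c14 = sum(1 for n in numbers if -16384 < n < 16384)
--     c22 = sum(1 for n in numbers if -4194304 < n < 4194304)
--     return bits + 32 * len(numbers) - 8 * (c6 + c14 + c22)
-- ===== Notes on version B (the rewrite author's own statement) =====
-- stated objective: alternative
-- what changed: Replaces the single accumulating loop with four-way branching by staged aggregate passes: a sum of bit lengths plus three value-range threshold counts (|n|<2^6, 2^14, 2^22) combined arithmetically, so no per-element bucket selection or bit_length comparison occurs.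
import Mathlib
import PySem

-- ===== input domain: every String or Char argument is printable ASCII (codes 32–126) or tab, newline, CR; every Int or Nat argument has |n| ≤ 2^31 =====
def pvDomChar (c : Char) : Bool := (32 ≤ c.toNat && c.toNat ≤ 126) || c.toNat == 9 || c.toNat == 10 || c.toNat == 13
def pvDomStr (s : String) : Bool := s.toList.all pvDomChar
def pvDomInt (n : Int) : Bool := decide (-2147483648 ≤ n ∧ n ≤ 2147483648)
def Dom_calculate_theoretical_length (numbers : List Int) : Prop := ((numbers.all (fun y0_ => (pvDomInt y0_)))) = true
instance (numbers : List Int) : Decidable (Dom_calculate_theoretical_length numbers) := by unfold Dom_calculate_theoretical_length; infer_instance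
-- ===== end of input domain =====

-- B computes the total by staged aggregate passes (bit-length sum + value-range threshold counts) instead of A's accumulating loop with four-way bucket selection (alternative decomposition, same cost).

-- ===== PORT A =====
def calculate_theoretical_length (numbers : List Int) : Int :=
  numbers.foldl (fun length number =>
    let bit_length : Int := (PySem.Int.bitLength number : Int)
    if bit_length <= 6 then length + (2 + 6 + bit_length)
    else if bit_length <= 14 then length + (2 + 14 + bit_length)
    else if bit_length <= 22 then length + (2 + 22 + bit_length)
    else length + (2 + 30 + bit_length)) 0

-- ===== PORT B =====
def calculate_theoretical_length_alt (numbers : List Int) : Int :=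
  let bits : Int := (numbers.map (fun n => (PySem.Int.bitLength n : Int))).sum
  let c6 : Int := ((numbers.filter (fun n => decide (-64 < n ∧ n < 64))).length : Int)
  let c14 : Int := ((numbers.filter (fun n => decide (-16384 < n ∧ n < 16384))).length : Int)
  let c22 : Int := ((numbers.filter (fun n => decide (-4194304 < n ∧ n < 4194304))).length : Int)
  bits + 32 * (numbers.length : Int) - 8 * (c6 + c14 + c22)

-- ===== PRECONDITION & SPEC =====
def Spec_calculate_theoretical_length (numbers : List Int) (out : Int) : Prop := out = calculate_theoretical_length_alt numbers
instance (numbers : List Int) (out : Int) : Decidable (Spec_calculate_theoretical_length numbers out) := by unfold Spec_calculate_theoretical_length; infer_instance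

-- ===== CLAIM =====
def Claim_equal_calculate_theoretical_length : Prop := ∀ (numbers : List Int), Dom_calculate_theoretical_length numbers → Spec_calculate_theoretical_length numbers (calculate_theoretical_length numbers)

-- ===== LEMMAS AND PROOFS =====

-- bitLength ≤ k ↔ |n| < 2^k
lemma pv_bitLength_le_iff (n : Int) (k : Nat) :
    PySem.Int.bitLength n ≤ k ↔ n.natAbs < 2 ^ k := by
  constructor
  · intro h
    exact lt_of_lt_of_le (PySem.Int.lt_two_pow_bitLength n)
      (Nat.pow_le_pow_right (by norm_num) h)
  · intro h
    by_contra hk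
    rcases eq_or_ne n 0 with rfl | hn
    · simp [PySem.Int.bitLength_zero] at hk
    · have h1 := PySem.Int.two_pow_bitLength_le n hn
      have : 2 ^ k ≤ 2 ^ (PySem.Int.bitLength n - 1) :=
        Nat.pow_le_pow_right (by norm_num) (by omega)
      omega

-- A's bucket contribution in terms of the three range indicators
lemma pv_elem (n : Int) :
    (let bit_length : Int := (PySem.Int.bitLength n : Int)
     if bit_length <= 6 then (2 + 6 + bit_length)
     else if bit_length <= 14 then (2 + 14 + bit_length)
     else if bit_length <= 22 then (2 + 22 + bit_length)
     else (2 + 30 + bit_length)) =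
    (PySem.Int.bitLength n : Int) + 32
      - 8 * ((if decide (-64 < n ∧ n < 64) then (1:Int) else 0)
           + (if decide (-16384 < n ∧ n < 16384) then (1:Int) else 0)
           + (if decide (-4194304 < n ∧ n < 4194304) then (1:Int) else 0)) := by
  have h6 := pv_bitLength_le_iff n 6
  have h14 := pv_bitLength_le_iff n 14
  have h22 := pv_bitLength_le_iff n 22
  norm_num at h6 h14 h22
  simp only []
  split_ifs with a b c d e f g <;> simp_all <;> omega

lemma pv_foldl (l : List Int) (acc : Int) :
    l.foldl (fun length number =>
      let bit_length : Int := (PySem.Int.bitLength number : Int)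
      if bit_length <= 6 then length + (2 + 6 + bit_length)
      else if bit_length <= 14 then length + (2 + 14 + bit_length)
      else if bit_length <= 22 then length + (2 + 22 + bit_length)
      else length + (2 + 30 + bit_length)) acc =
    acc + calculate_theoretical_length_alt l := by
  induction l generalizing acc with
  | nil => simp [calculate_theoretical_length_alt]
  | cons x t ih =>
    have hx := pv_elem x
    simp only [calculate_theoretical_length_alt, List.foldl_cons, ih,
      List.map_cons, List.sum_cons, List.filter_cons, List.length_cons] at hx ⊢
    split_ifs at hx ⊢ <;> (try simp only [List.length_cons] at hx ⊢) <;> (try push_cast at hx ⊢) <;> omega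

-- ===== VERDICT =====
theorem calculate_theoretical_length_spec : Claim_equal_calculate_theoretical_length := by
  intro numbers _
  show _ = _
  unfold calculate_theoretical_length
  simpa using pv_foldl numbers 0
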